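-- pv_equiv track=rewrite | github.com/bocchiko/DSS-Polymorphic-Cipher | transmisor.py | key_table_generator
-- ===== SOURCE A (Python) =====
-- def key_table_generator(key_number, p, q, s):
--     keys = []
--     for i in range(key_number):
--         PO = scramble(p, s)
--         key = generation(PO, q)
--         keys.append(key)
--         s = mutation(s, q)
--     return keys
--
-- def scramble(x, y):
--     return (x ^ y) ^ (x >> 1)
--
-- def generation(x, y):
--     return (x & y) ^ (x << 1)
--
-- def mutation(x, y):
--     return (x | y) ^ (y >> 1)
-- ===== SOURCE B (Python) =====
-- def _mut(x, y):
--     return (x | y) ^ (y >> 1)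
--
-- def _key(p, q, st):
--     po = (p ^ st) ^ (p >> 1)
--     return (po & q) ^ (po << 1)
--
-- def key_table_generator(key_number, p, q, s):
--     # materialize the state walk first, then derive the keys in a second pass
--     states = []
--     st = s
--     for _ in range(max(key_number, 0)):
--         states.append(st)
--         st = _mut(st, q)
--     return [_key(p, q, st) for st in states]
-- ===== Notes on version B (the rewrite author's own statement) =====
-- stated objective: alternative
-- what changed: Replaces the single fused loop (which interleaves key emission with state mutation via list append) with two decoupled passes: first build the list of key_number successive states, then map each state independently to its key.
import Mathlib
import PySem

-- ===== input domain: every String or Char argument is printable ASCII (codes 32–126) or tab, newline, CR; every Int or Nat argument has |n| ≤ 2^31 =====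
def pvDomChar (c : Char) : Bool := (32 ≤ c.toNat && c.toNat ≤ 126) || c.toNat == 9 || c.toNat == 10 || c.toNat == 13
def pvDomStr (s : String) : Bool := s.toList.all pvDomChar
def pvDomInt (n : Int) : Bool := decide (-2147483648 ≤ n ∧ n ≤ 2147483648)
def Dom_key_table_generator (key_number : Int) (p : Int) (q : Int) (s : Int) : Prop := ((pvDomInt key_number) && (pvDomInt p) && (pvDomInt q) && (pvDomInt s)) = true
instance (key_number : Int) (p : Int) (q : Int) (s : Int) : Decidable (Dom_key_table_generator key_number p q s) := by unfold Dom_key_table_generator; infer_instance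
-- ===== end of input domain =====

-- B decouples A's fused loop into a state-walk pass plus a mapping pass (objective: alternative decomposition, same cost).
-- ===== PORT A =====
def scrambleA (x : Int) (y : Int) : Int := PySem.Int.bxor (PySem.Int.bxor x y) (x >>> 1)
def generationA (x : Int) (y : Int) : Int := PySem.Int.bxor (PySem.Int.band x y) (x <<< 1)
def mutationA (x : Int) (y : Int) : Int := PySem.Int.bxor (PySem.Int.bor x y) (y >>> 1)

def key_table_generator (key_number : Int) (p : Int) (q : Int) (s : Int) : List Int :=
  ((PySem.List.pyRange 0 key_number 1).foldl
    (fun (acc : List Int × Int) _ =>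
      let PO := scrambleA p acc.2
      let key := generationA PO q
      (acc.1 ++ [key], mutationA acc.2 q))
    (([] : List Int), s)).1

-- ===== PORT B =====
def mutB (x : Int) (y : Int) : Int := PySem.Int.bxor (PySem.Int.bor x y) (y >>> 1)
def keyB (p : Int) (q : Int) (st : Int) : Int :=
  let po := PySem.Int.bxor (PySem.Int.bxor p st) (p >>> 1)
  PySem.Int.bxor (PySem.Int.band po q) (po <<< 1)

def statesB (n : Nat) (q : Int) (st : Int) : List Int :=
  match n with
  | 0 => []
  | n + 1 => st :: statesB n q (mutB st q)

def key_table_generator_alt (key_number : Int) (p : Int) (q : Int) (s : Int) : List Int :=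
  (statesB (max key_number 0).toNat q s).map (keyB p q)

-- ===== PRECONDITION & SPEC =====
def Spec_key_table_generator (key_number : Int) (p : Int) (q : Int) (s : Int) (out : List Int) : Prop := out = key_table_generator_alt key_number p q s
instance (key_number : Int) (p : Int) (q : Int) (s : Int) (out : List Int) : Decidable (Spec_key_table_generator key_number p q s out) := by unfold Spec_key_table_generator; infer_instance

-- ===== CLAIM (what is proved, stated in full; the proofs are below) =====
def Claim_equal_key_table_generator : Prop := ∀ (key_number : Int) (p : Int) (q : Int) (s : Int), Dom_key_table_generator key_number p q s → Spec_key_table_generator key_number p q s (key_table_generator key_number p q s)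

-- ===== LEMMAS AND PROOFS =====
lemma loopA_eq (p q : Int) : ∀ (l : List Int) (keys : List Int) (s : Int),
    (l.foldl
      (fun (acc : List Int × Int) _ =>
        let PO := scrambleA p acc.2
        let key := generationA PO q
        (acc.1 ++ [key], mutationA acc.2 q))
      (keys, s)).1 = keys ++ (statesB l.length q s).map (keyB p q) := by
  intro l
  induction l with
  | nil => intro keys s; simp [statesB]
  | cons a t ih =>
      intro keys s
      simp only [List.foldl_cons, List.length_cons, statesB, List.map_cons]
      rw [ih]
      simp [scrambleA, generationA, mutationA, mutB, keyB]

-- ===== VERDICT (by name: the statement is the Claim_ definition above) =====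
theorem key_table_generator_spec : Claim_equal_key_table_generator := by
  intro kn p q s _
  unfold Spec_key_table_generator key_table_generator key_table_generator_alt
  rw [loopA_eq, PySem.List.length_pyRange_one]
  have : (kn - 0).toNat = (max kn 0).toNat := by omega
  rw [this]
  simp
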